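-- pv_equiv track=rewrite | github.com/JorgeLuizFranco/toporag | liftings/clique_lifting.py | _get_all_subfaces
-- ===== SOURCE A (Python) =====
-- from typing import Optional, List, Set
-- from itertools import combinations
--
-- def _get_all_subfaces(clique: Set[int]) -> List[Set[int]]:
--     """
--     Get all non-empty subsets of a clique (simplicial closure).
--
--     For a k-clique, returns all subsets from size 1 to k.
--     """
--     subfaces = []
--     clique_list = list(clique)
--     n = len(clique_list)
--
--     for size in range(1, n + 1):
--         for subset in combinations(clique_list, size):
--             subfaces.append(set(subset))
--
--     return subfaces
-- ===== SOURCE B (Python) =====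
-- from typing import List, Set
--
-- def _get_all_subfaces(clique: Set[int]) -> List[Set[int]]:
--     """All non-empty subsets, grouped by size, via explicit backtracking."""
--     clique_list = list(clique)
--     n = len(clique_list)
--     subfaces = []
--     for size in range(1, n + 1):
--         chosen = []
--
--         def rec(start):
--             if len(chosen) == size:
--                 subfaces.append(set(chosen))
--                 return
--             for j in range(start, n):
--                 chosen.append(clique_list[j])
--                 rec(j + 1)
--                 chosen.pop()
--
--         rec(0)
--     return subfaces
-- ===== Notes on version B (the rewrite author's own statement) =====
-- stated objective: alternative
-- what changed: Replaces the itertools.combinations library calls with an explicit recursive backtracking enumerator (chosen-prefix accumulator with append/recurse/pop) driven by an outer size loop.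
import Mathlib
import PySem

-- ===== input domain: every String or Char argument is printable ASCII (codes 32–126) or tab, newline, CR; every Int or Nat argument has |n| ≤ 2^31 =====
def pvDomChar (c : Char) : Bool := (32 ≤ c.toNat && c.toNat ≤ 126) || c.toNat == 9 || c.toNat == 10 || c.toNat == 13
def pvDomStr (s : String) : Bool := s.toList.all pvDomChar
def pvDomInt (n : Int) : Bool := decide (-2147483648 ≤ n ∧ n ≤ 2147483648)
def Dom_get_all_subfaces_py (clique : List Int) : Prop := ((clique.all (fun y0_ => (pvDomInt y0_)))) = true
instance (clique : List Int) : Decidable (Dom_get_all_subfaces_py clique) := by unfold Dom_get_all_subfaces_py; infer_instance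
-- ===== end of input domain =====

-- B differs by decomposition only (explicit backtracking vs library combinations); same output, same cost.

-- ===== PORT A =====
-- itertools.combinations(xs, s) in lexicographic order over index positions
def combosA : List Int → Nat → List (List Int)
  | _, 0 => [[]]
  | [], _ + 1 => []
  | x :: xs, s + 1 => (combosA xs s).map (fun c => x :: c) ++ combosA xs (s + 1)

-- for size in range(1, n+1): for subset in combinations(clique_list, size): subfaces.append(set(subset))
def get_all_subfaces_py (clique : List Int) : List (List Int) :=
  (List.range clique.length).foldl (fun acc s => acc ++ combosA clique (s + 1)) []

-- ===== PORT B =====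
-- rec(start): if len(chosen)==size append set(chosen); else for j in range(start,n): push clique[j], rec(j+1), pop.
-- `rest` is the suffix clique_list[start:]; the loop over j is the traversal of rest's tails.
def recB (size : Nat) (chosen : List Int) : List Int → List (List Int) → List (List Int)
  | [], acc => if chosen.length = size then acc ++ [chosen] else acc
  | x :: xs, acc =>
    if chosen.length = size then acc ++ [chosen]
    else recB size chosen xs (recB size (chosen ++ [x]) xs acc)

def get_all_subfaces_py_alt (clique : List Int) : List (List Int) :=
  (List.range clique.length).foldl (fun acc s => recB (s + 1) [] clique acc) []

-- ===== PRECONDITION & SPEC =====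
def Spec_get_all_subfaces_py (clique : List Int) (out : List (List Int)) : Prop := out = get_all_subfaces_py_alt clique
instance (clique : List Int) (out : List (List Int)) : Decidable (Spec_get_all_subfaces_py clique out) := by unfold Spec_get_all_subfaces_py; infer_instance

-- ===== CLAIM (what is proved, stated in full; the proofs are below) =====
def Claim_equal_get_all_subfaces_py : Prop := ∀ (clique : List Int), Dom_get_all_subfaces_py clique → Spec_get_all_subfaces_py clique (get_all_subfaces_py clique)

-- ===== LEMMAS AND PROOFS =====

-- Backtracking with prefix `chosen` enumerates exactly the (size - |chosen|)-combinations of the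
-- remaining suffix, each prefixed by `chosen`, appended after the accumulator.
theorem recB_eq (size : Nat) (rest : List Int) :
    ∀ chosen acc, chosen.length ≤ size →
      recB size chosen rest acc
        = acc ++ (combosA rest (size - chosen.length)).map (fun c => chosen ++ c) := by
  induction rest with
  | nil =>
      intro chosen acc h
      rcases Nat.eq_or_lt_of_le h with heq | hlt
      · simp [recB, heq, combosA]
      · have : size - chosen.length ≠ 0 := Nat.sub_ne_zero_of_lt hlt
        obtain ⟨k, hk⟩ := Nat.exists_eq_succ_of_ne_zero this
        simp [recB, Nat.ne_of_lt hlt, hk, combosA]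
  | cons x xs ih =>
      intro chosen acc h
      rcases Nat.eq_or_lt_of_le h with heq | hlt
      · simp [recB, heq, combosA]
      · rw [recB, if_neg (Nat.ne_of_lt hlt)]
        have h1 : (chosen ++ [x]).length ≤ size := by
          simp; omega
        rw [ih (chosen ++ [x]) acc h1, ih chosen _ (Nat.le_of_lt hlt)]
        have hk : ∃ k, size - chosen.length = k + 1 :=
          Nat.exists_eq_succ_of_ne_zero (Nat.sub_ne_zero_of_lt hlt)
        obtain ⟨k, hk⟩ := hk
        have hk' : size - (chosen ++ [x]).length = k := by simp; omega
        rw [hk, hk', combosA]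
        simp [List.map_map, Function.comp, List.append_assoc]

-- ===== VERDICT (by name: the statement is the Claim_ definition above) =====
theorem get_all_subfaces_py_spec : Claim_equal_get_all_subfaces_py := by
  intro clique _
  unfold Spec_get_all_subfaces_py get_all_subfaces_py get_all_subfaces_py_alt
  have hf : (fun (acc : List (List Int)) (s : Nat) => recB (s + 1) [] clique acc)
      = fun acc s => acc ++ combosA clique (s + 1) := by
    funext acc s
    rw [recB_eq (s + 1) clique [] acc (by simp)]
    simp
  rw [hf]
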